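-- pv_equiv track=rewrite | github.com/matteogabburo/AsciiWords | ascii_word.py | add_on
-- ===== SOURCE A (Python) =====
-- def add_on(s, seq):
--     to_add = seq.split('\n')
--     to_add = [' ' if a == '' else a for a in to_add]
--
--     new_s = []
--     len_s = len(s[0])
--     for i in range(len(to_add)):
--         new_l = []
--         j = 0
--         while j < len_s:
--             for c in to_add[i]:
--                 if j >= len_s:
--                     break
--                 new_l.append(c)
--                 j += 1
--         new_s.append(new_l)
--
--     for l in s:
--         new_s.append(l)
--
--     return new_s
-- ===== SOURCE B (Python) =====
-- def add_on(s, seq):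
--     to_add = [a or ' ' for a in seq.split('\n')]
--     len_s = len(s[0])
--     new_s = [list((line * (len_s // len(line) + 1))[:len_s]) for line in to_add]
--     new_s.extend(s)
--     return new_s
-- ===== Notes on version B (the rewrite author's own statement) =====
-- stated objective: simpler
-- what changed: Replaces the char-by-char while/for-with-break cyclic filling loop with a closed-form row construction (repeat the line ceil-many times, slice to width) in a single comprehension, then extends with the original rows.
import Mathlib
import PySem

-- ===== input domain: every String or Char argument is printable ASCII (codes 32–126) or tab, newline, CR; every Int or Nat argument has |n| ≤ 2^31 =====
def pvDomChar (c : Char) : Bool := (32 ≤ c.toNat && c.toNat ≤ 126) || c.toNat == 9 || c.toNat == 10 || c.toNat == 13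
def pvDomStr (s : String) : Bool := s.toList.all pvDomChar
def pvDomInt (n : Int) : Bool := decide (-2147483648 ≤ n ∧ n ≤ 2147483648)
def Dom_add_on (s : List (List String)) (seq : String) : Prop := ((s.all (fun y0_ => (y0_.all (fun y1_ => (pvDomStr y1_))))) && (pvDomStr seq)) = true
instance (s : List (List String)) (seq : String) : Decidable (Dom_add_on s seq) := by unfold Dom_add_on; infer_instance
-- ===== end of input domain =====

-- B replaces the char-by-char while/for-with-break cyclic fill with a closed-form
-- repeat-and-slice row construction (objective: simpler).

-- ===== PORT A =====
-- inner 'for c in to_add[i]' loop with its 'if j >= len_s: break'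
def innerPass (lenS : Nat) : List Char → List String → Nat → List String × Nat
  | [], acc, j => (acc, j)
  | c :: cs, acc, j =>
    if j ≥ lenS then (acc, j)
    else innerPass lenS cs (acc ++ [String.singleton c]) (j + 1)

-- outer 'while j < len_s' loop; fuel only makes the loop total (the Python loop
-- terminates because the line is nonempty, so fuel = len_s + 1 passes suffice)
def whileFill (fuel : Nat) (line : List Char) (lenS : Nat) (acc : List String) (j : Nat) : List String :=
  match fuel with
  | 0 => acc
  | fuel + 1 =>
    if j < lenS then
      let p := innerPass lenS line acc j
      whileFill fuel line lenS p.1 p.2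
    else acc

def add_on (s : List (List String)) (seq : String) : List (List String) :=
  let toAdd := ((PySem.Str.split? seq "\n").getD []).map (fun a => if a = "" then " " else a)
  let lenS := (s.headD []).length
  let newS := toAdd.foldl (fun ns line => ns ++ [whileFill (lenS + 1) line.toList lenS [] 0]) ([] : List (List String))
  s.foldl (fun ns l => ns ++ [l]) newS

-- ===== PORT B =====
-- list((line * (len_s // len(line) + 1))[:len_s])
def fillRow (lenS : Nat) (line : List Char) : List String :=
  ((List.replicate (lenS / line.length + 1) line).flatten.take lenS).map (fun c => String.singleton c)

def add_on_alt (s : List (List String)) (seq : String) : List (List String) :=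
  let toAdd := ((PySem.Str.split? seq "\n").getD []).map (fun a => if a = "" then " " else a)
  let lenS := (s.headD []).length
  (toAdd.map (fun line => fillRow lenS line.toList)) ++ s

-- ===== PRECONDITION & SPEC =====
-- Python A evaluates len(s[0]), which raises IndexError on s = []; B raises there too.
def Pre_add_on (s : List (List String)) (seq : String) : Prop := s ≠ []
instance (s : List (List String)) (seq : String) : Decidable (Pre_add_on s seq) := by unfold Pre_add_on; infer_instance
def pvWitness_add_on : List (List String) × String := ([["x", "y"]], "ab")

def Spec_add_on (s : List (List String)) (seq : String) (out : List (List String)) : Prop := out = add_on_alt s seq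
instance (s : List (List String)) (seq : String) (out : List (List String)) : Decidable (Spec_add_on s seq out) := by unfold Spec_add_on; infer_instance

-- ===== CLAIM (what is proved, stated in full; the proofs are below) =====
def Claim_equal_add_on : Prop := ∀ (s : List (List String)) (seq : String), Dom_add_on s seq → Pre_add_on s seq → Spec_add_on s seq (add_on s seq)

-- ===== LEMMAS AND PROOFS =====

theorem innerPass_eq (lenS : Nat) (cs : List Char) (acc : List String) (j : Nat) :
    innerPass lenS cs acc j =
      (acc ++ (cs.take (lenS - j)).map (fun c => String.singleton c), j + min cs.length (lenS - j)) := by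
  induction cs generalizing acc j with
  | nil => simp [innerPass]
  | cons c cs ih =>
    simp only [innerPass]
    split
    · have h0 : lenS - j = 0 := by omega
      simp [h0]
    · have h1 : lenS - j = (lenS - (j + 1)) + 1 := by omega
      rw [ih, h1]
      simp only [List.take_succ_cons, List.map_cons, Prod.mk.injEq, List.length_cons]
      constructor
      · simp
      · omega

theorem flatten_replicate_length (l : List Char) (m : Nat) :
    ((List.replicate m l).flatten).length = m * l.length := by
  induction m with
  | zero => simp
  | succ m ih => simp [List.replicate_succ, ih, Nat.succ_mul]; ring

theorem whileFill_eq (line : List Char) (lenS : Nat) (fuel : Nat) :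
    ∀ (acc : List String) (j : Nat), lenS - j ≤ fuel * line.length →
    whileFill fuel line lenS acc j =
      acc ++ (((List.replicate fuel line).flatten.take (lenS - j)).map (fun c => String.singleton c)) := by
  induction fuel with
  | zero =>
    intro acc j h
    have h0 : lenS - j = 0 := by omega
    simp [whileFill, h0]
  | succ fuel ih =>
    intro acc j h
    simp only [whileFill]
    split
    · rw [innerPass_eq]
      have hsucc : (fuel + 1) * line.length = fuel * line.length + line.length := by ring
      have hj' : lenS - (j + min line.length (lenS - j)) = (lenS - j) - line.length := by omega
      rw [ih _ _ (by rw [hj']; omega)]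
      rw [hj', List.replicate_succ, List.flatten_cons, List.take_append,
        List.map_append, List.append_assoc]
    · have h0 : lenS - j = 0 := by omega
      simp [h0]

theorem take_flatten_replicate_succ (l : List Char) (m n : Nat) (h : n ≤ m * l.length) :
    ((List.replicate (m + 1) l).flatten).take n = ((List.replicate m l).flatten).take n := by
  rw [List.replicate_succ', List.flatten_append, List.take_append_of_le_length]
  rw [flatten_replicate_length]; exact h

theorem take_flatten_replicate_add (l : List Char) (m k n : Nat) (h : n ≤ m * l.length) :
    ((List.replicate (m + k) l).flatten).take n = ((List.replicate m l).flatten).take n := by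
  induction k with
  | zero => rfl
  | succ k ih =>
    rw [show m + (k + 1) = (m + k) + 1 by ring, take_flatten_replicate_succ, ih]
    calc n ≤ m * l.length := h
      _ ≤ (m + k) * l.length := Nat.mul_le_mul_right _ (by omega)

theorem take_flatten_replicate_stable (l : List Char) (m m' n : Nat)
    (h : n ≤ m * l.length) (h' : n ≤ m' * l.length) :
    ((List.replicate m l).flatten).take n = ((List.replicate m' l).flatten).take n := by
  rcases Nat.le_total m m' with hle | hle
  · obtain ⟨k, rfl⟩ := Nat.exists_eq_add_of_le hle
    exact (take_flatten_replicate_add l m k n h).symm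
  · obtain ⟨k, rfl⟩ := Nat.exists_eq_add_of_le hle
    exact take_flatten_replicate_add l m' k n h' 

theorem if_line_ne_nil (a : String) : (if a = "" then " " else a).toList ≠ [] := by
  by_cases h : a = ""
  · simp [h]
  · simp only [h, if_false]
    intro hnil
    apply h
    have := congrArg String.ofList hnil
    simpa using this

theorem row_eq (lenS : Nat) (line : List Char) (hl : line ≠ []) :
    whileFill (lenS + 1) line lenS [] 0 = fillRow lenS line := by
  have hpos : 0 < line.length := List.length_pos_iff.mpr hl
  have hbig : lenS + 1 ≤ (lenS + 1) * line.length := Nat.le_mul_of_pos_right _ hpos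
  have hA : lenS - 0 ≤ (lenS + 1) * line.length := by omega
  rw [whileFill_eq line lenS (lenS + 1) [] 0 hA]
  simp only [Nat.sub_zero, List.nil_append, fillRow]
  congr 1
  apply take_flatten_replicate_stable
  · omega
  · have hq : line.length * (lenS / line.length) + lenS % line.length = lenS :=
      Nat.div_add_mod lenS line.length
    have hm : lenS % line.length < line.length := Nat.mod_lt _ hpos
    calc lenS = line.length * (lenS / line.length) + lenS % line.length := hq.symm
      _ ≤ line.length * (lenS / line.length) + line.length := by omega
      _ = (lenS / line.length + 1) * line.length := by ring

-- ===== VERDICT (by name: the statement is the Claim_ definition above) =====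
theorem add_on_spec : Claim_equal_add_on := by
  intro s seq _ _
  simp only [Spec_add_on, add_on, add_on_alt, PySem.List.foldl_append_singleton_eq_map,
    List.nil_append, List.map_id']
  congr 1
  apply List.map_congr_left
  intro line hline
  obtain ⟨a, _, rfl⟩ := List.mem_map.mp hline
  exact row_eq _ _ (if_line_ne_nil a)
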